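-- pv_equiv track=rewrite | github.com/ghxstship/grasshopper26.00 | scripts/fix-dark-theme-selectors.py | fix_dark_selectors
-- ===== SOURCE A (Python) =====
-- def fix_dark_selectors(content: str) -> tuple[str, int]:
--     """
--     Remove .dark class from dual selectors, keeping only [data-theme="dark"].
--     Returns (fixed_content, number_of_changes).
--     """
--     changes = 0
--     lines = content.split('\n')
--     result = []
--     i = 0
--
--     while i < len(lines):
--         line = lines[i]
--
--         # Check if this line starts with .dark and next line has [data-theme="dark"]
--         if i + 1 < len(lines):
--             next_line = lines[i + 1]
--
--             # Pattern: .dark SELECTOR,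
--             # Next line: [data-theme="dark"] SELECTOR {
--             if (line.strip().startswith('.dark ') and
--                 line.strip().endswith(',') and
--                 next_line.strip().startswith('[data-theme="dark"]')):
--                 # Skip the .dark line, keep the [data-theme="dark"] line
--                 changes += 1
--                 i += 1
--                 continue
--
--         result.append(line)
--         i += 1
--
--     return '\n'.join(result), changes
-- ===== SOURCE B (Python) =====
-- def fix_dark_selectors(content: str) -> tuple[str, int]:
--     """
--     Remove .dark class from dual selectors, keeping only [data-theme="dark"].
--     Returns (fixed_content, number_of_changes).
--     """
--     # Reverse-order single pass: walk the lines from last to first carrying one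
--     # bit of state ("does the line after this one start with [data-theme=...]?"),
--     # so no forward lookahead or indexing is ever needed.
--     kept = []
--     changes = 0
--     next_is_theme = False
--     for line in reversed(content.split('\n')):
--         s = line.strip()
--         if next_is_theme and s.startswith('.dark ') and s.endswith(','):
--             changes += 1
--         else:
--             kept.append(line)
--         next_is_theme = s.startswith('[data-theme="dark"]')
--     return '\n'.join(reversed(kept)), changes
-- ===== Notes on version B (the rewrite author's own statement) =====
-- stated objective: alternative
-- what changed: Replaces A's forward index-driven while loop with next-line lookahead (skip-and-continue) by a reverse-order single pass that carries one bit of state (whether the following line starts with [data-theme="dark"]), building the kept lines back-to-front and reversing once at the end.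
import Mathlib
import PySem

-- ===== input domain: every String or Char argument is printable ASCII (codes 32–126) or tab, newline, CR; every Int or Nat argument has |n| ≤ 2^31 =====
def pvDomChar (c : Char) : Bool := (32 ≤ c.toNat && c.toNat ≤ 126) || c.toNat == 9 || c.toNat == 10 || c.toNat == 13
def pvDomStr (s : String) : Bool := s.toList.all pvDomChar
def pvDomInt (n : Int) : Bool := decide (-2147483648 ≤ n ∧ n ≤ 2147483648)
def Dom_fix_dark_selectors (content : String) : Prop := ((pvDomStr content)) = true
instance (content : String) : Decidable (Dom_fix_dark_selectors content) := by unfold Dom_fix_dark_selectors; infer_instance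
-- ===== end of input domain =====

-- B replaces A's forward index loop with next-line lookahead by a reverse-order pass
-- carrying one bit of state ("is the following line a data-theme line?"); same cost,
-- genuinely different traversal order (objective: alternative).

-- ===== PORT A =====
-- A's while loop over index i inspects lines[i] and lines[i+1] and either skips or appends;
-- ported as structural recursion on the remaining suffix of lines with the same (result, changes) state.
def fixLoopA (ls : List String) (res : List String) (ch : Int) : List String × Int :=
  match ls with
  | [] => (res, ch)
  | [line] => (res ++ [line], ch)
  | line :: next :: rest =>
    if PySem.Str.startswith (PySem.Str.strip line) ".dark " &&
       PySem.Str.endswith (PySem.Str.strip line) "," &&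
       PySem.Str.startswith (PySem.Str.strip next) "[data-theme=\"dark\"]" then
      fixLoopA (next :: rest) res (ch + 1)
    else
      fixLoopA (next :: rest) (res ++ [line]) ch

def fix_dark_selectors (content : String) : String × Int :=
  let lines := (PySem.Str.split? content "\n").getD []   -- sep "\n" ≠ "", so split? is always `some`
  let r := fixLoopA lines [] 0
  (PySem.Str.join "\n" r.1, r.2)

-- ===== PORT B =====
-- B's loop body: state (kept, changes, next_is_theme), one iteration per line of reversed(lines)
def stepB (st : List String × Int × Bool) (line : String) : List String × Int × Bool :=
  let s := PySem.Str.strip line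
  if st.2.2 && PySem.Str.startswith s ".dark " && PySem.Str.endswith s "," then
    (st.1, st.2.1 + 1, PySem.Str.startswith s "[data-theme=\"dark\"]")
  else
    (st.1 ++ [line], st.2.1, PySem.Str.startswith s "[data-theme=\"dark\"]")

def fix_dark_selectors_alt (content : String) : String × Int :=
  let lines := (PySem.Str.split? content "\n").getD []   -- sep "\n" ≠ "", so split? is always `some`
  let st := lines.reverse.foldl stepB ([], 0, false)
  (PySem.Str.join "\n" st.1.reverse, st.2.1)

-- ===== PRECONDITION & SPEC =====
def Spec_fix_dark_selectors (content : String) (out : String × Int) : Prop := out = fix_dark_selectors_alt content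
instance (content : String) (out : String × Int) : Decidable (Spec_fix_dark_selectors content out) := by unfold Spec_fix_dark_selectors; infer_instance

-- ===== CLAIM (what is proved, stated in full; the proofs are below) =====
def Claim_equal_fix_dark_selectors : Prop := ∀ (content : String), Dom_fix_dark_selectors content → Spec_fix_dark_selectors content (fix_dark_selectors content)

-- ===== LEMMAS AND PROOFS =====

def pvRedundant (l n : String) : Bool :=
  PySem.Str.startswith (PySem.Str.strip l) ".dark " &&
  PySem.Str.endswith (PySem.Str.strip l) "," &&
  PySem.Str.startswith (PySem.Str.strip n) "[data-theme=\"dark\"]"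

-- the common characterization: which lines are kept, and how many are dropped
def keptSpec : List String → List String
  | [] => []
  | [l] => [l]
  | l :: n :: rest => (if pvRedundant l n then [] else [l]) ++ keptSpec (n :: rest)

def dropCt : List String → Int
  | [] => 0
  | [_] => 0
  | l :: n :: rest => (if pvRedundant l n then 1 else 0) + dropCt (n :: rest)

def headTheme : List String → Bool
  | [] => false
  | h :: _ => PySem.Str.startswith (PySem.Str.strip h) "[data-theme=\"dark\"]"

theorem fixLoopA_eq (ls res : List String) (ch : Int) :
    fixLoopA ls res ch = (res ++ keptSpec ls, ch + dropCt ls) := by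
  induction ls using keptSpec.induct generalizing res ch
  case case1 => simp [fixLoopA, keptSpec, dropCt]
  case case2 l => simp [fixLoopA, keptSpec, dropCt]
  case case3 l n rest ih =>
    by_cases h : pvRedundant l n = true
    · have h' : (PySem.Str.startswith (PySem.Str.strip l) ".dark " &&
         PySem.Str.endswith (PySem.Str.strip l) "," &&
         PySem.Str.startswith (PySem.Str.strip n) "[data-theme=\"dark\"]") = true := h
      simp only [fixLoopA]
      rw [if_pos h', ih]
      simp [keptSpec, dropCt, h]
      ring
    · have h' : ¬ ((PySem.Str.startswith (PySem.Str.strip l) ".dark " &&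
         PySem.Str.endswith (PySem.Str.strip l) "," &&
         PySem.Str.startswith (PySem.Str.strip n) "[data-theme=\"dark\"]") = true) := h
      simp only [fixLoopA]
      rw [if_neg h', ih]
      simp [keptSpec, dropCt, h]

theorem foldB_eq (ls : List String) (kept : List String) (ch : Int) :
    ls.reverse.foldl stepB (kept, ch, false) =
      (kept ++ (keptSpec ls).reverse, ch + dropCt ls, headTheme ls) := by
  induction ls using keptSpec.induct generalizing kept ch
  case case1 => simp [keptSpec, dropCt, headTheme]
  case case2 l =>
    simp [keptSpec, dropCt, headTheme, stepB]
  case case3 l n rest ih =>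
    have hrev : (l :: n :: rest).reverse = (n :: rest).reverse ++ [l] := by simp
    rw [hrev, List.foldl_append, ih]
    simp only [List.foldl_cons, List.foldl_nil]
    simp [stepB, keptSpec, dropCt, headTheme, pvRedundant]
    split_ifs with hL hR hR
    · simp only [Prod.mk.injEq, List.reverse_nil, List.append_nil, true_and, and_true]
      omega
    · exact absurd ⟨⟨hL.1.2, hL.2⟩, hL.1.1⟩ hR
    · exact absurd ⟨⟨hR.2, hR.1.1⟩, hR.1.2⟩ hL
    · simp

theorem fix_dark_selectors_eq_alt (content : String) :
    fix_dark_selectors content = fix_dark_selectors_alt content := by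
  simp only [fix_dark_selectors, fix_dark_selectors_alt, fixLoopA_eq, foldB_eq]
  simp

-- ===== VERDICT (by name: the statement is the Claim_ definition above) =====
theorem fix_dark_selectors_spec : Claim_equal_fix_dark_selectors := by
  intro content _
  unfold Spec_fix_dark_selectors
  exact fix_dark_selectors_eq_alt content
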